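-- pv_equiv track=rewrite | github.com/MartinOpat/Algorithms-Implementation-In-cpp-python | Other problems/bicode.py | solve
-- ===== SOURCE A (Python) =====
-- def solve(n):
--     if n == 0: return []
--     if n == 10: return [5, 5]
--     s = str(n)
--     l, r = (len(s)+1)//2, len(s)//2
--     p = lambda s: s + ''.join(reversed(s[:r]))
--     x = int(str(n)[:l])
--     if int(p(str(x))) > n: x -= 1
--     a = int(p(str(x)))
--     return solve(n-a) + [a]
-- ===== SOURCE B (Python) =====
-- def _largest_palindrome(n):
--     s = str(n)
--     half, mirror = (len(s) + 1) // 2, len(s) // 2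
--     x = int(s[:half])
--     pal = int(str(x) + str(x)[:mirror][::-1])
--     if pal > n:
--         x -= 1
--         pal = int(str(x) + str(x)[:mirror][::-1])
--     return pal
--
-- def solve(n):
--     out = []
--     while n != 0:
--         if n == 10:
--             out += [5, 5]
--             break
--         a = _largest_palindrome(n)
--         out.append(a)
--         n -= a
--     return out[::-1]
-- ===== Notes on version B (the rewrite author's own statement) =====
-- stated objective: idiomatic
-- what changed: A's recursion (solve(n-a) + [a]) is replaced by an iterative while-loop that appends each greedy palindrome to an accumulator and reverses it once at the end, with the largest-palindrome construction factored out of the loop into a named helper.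
import Mathlib
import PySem

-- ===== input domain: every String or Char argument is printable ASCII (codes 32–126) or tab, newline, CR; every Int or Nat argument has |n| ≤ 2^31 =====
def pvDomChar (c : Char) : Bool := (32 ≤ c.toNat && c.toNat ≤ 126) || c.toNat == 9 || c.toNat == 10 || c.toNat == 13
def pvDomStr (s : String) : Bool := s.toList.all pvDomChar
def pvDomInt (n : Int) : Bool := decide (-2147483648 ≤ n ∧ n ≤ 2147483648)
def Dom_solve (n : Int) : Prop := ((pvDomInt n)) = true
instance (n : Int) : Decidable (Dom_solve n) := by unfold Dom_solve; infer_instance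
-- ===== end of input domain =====

-- B replaces A's recursion by an iterative loop that appends each greedy palindrome and
-- reverses once at the end, with the largest-palindrome construction factored into a helper
-- (objective: idiomatic/alternative decomposition, same asymptotic cost).

-- ===== PORT A =====
-- fuel is only a totality guard (each step decreases n by the palindrome a ≥ 1 on valid
-- inputs, so n.toNat + 1 steps always suffice); [] on a failed int() parse marks the
-- ValueError Python raises there (reachable only for n < 0, outside Pre_solve).
def solveFuel : Nat → Int → List Int
  | 0, _ => []
  | f+1, n =>
    if n = 0 then []
    else if n = 10 then [5, 5]
    else
      let s := PySem.Int.toChars n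
      let l := PySem.Int.floordiv ((s.length : Int) + 1) 2
      let r := PySem.Int.floordiv (s.length : Int) 2
      let p := fun (t : List Char) => t ++ (PySem.List.slice t none (some r)).reverse
      match PySem.Int.ofChars? (PySem.List.slice s none (some l)) with
      | none => []
      | some x0 =>
        match PySem.Int.ofChars? (p (PySem.Int.toChars x0)) with
        | none => []
        | some px =>
          let x := if px > n then x0 - 1 else x0
          match PySem.Int.ofChars? (p (PySem.Int.toChars x)) with
          | none => []
          | some a => solveFuel f (n - a) ++ [a]

def solve (n : Int) : List Int := solveFuel (n.toNat + 1) n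

-- ===== PORT B =====
-- _largest_palindrome of Source B; none marks the ValueError of int() (only for n < 0).
def pvLargestPal (n : Int) : Option Int :=
  let s := PySem.Int.toChars n
  let half := PySem.Int.floordiv ((s.length : Int) + 1) 2
  let mirror := PySem.Int.floordiv (s.length : Int) 2
  match PySem.Int.ofChars? (PySem.List.slice s none (some half)) with
  | none => none
  | some x =>
    match PySem.Int.ofChars? (PySem.Int.toChars x ++ (PySem.List.slice (PySem.Int.toChars x) none (some mirror)).reverse) with
    | none => none
    | some pal =>
      if pal > n then
        PySem.Int.ofChars? (PySem.Int.toChars (x - 1) ++ (PySem.List.slice (PySem.Int.toChars (x - 1)) none (some mirror)).reverse)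
      else some pal

-- the while-loop of Source B; same fuel guard; out is the append-accumulator.
def pvAltLoop : Nat → Int → List Int → List Int
  | 0, _, out => out
  | f+1, n, out =>
    if n = 0 then out
    else if n = 10 then out ++ [5, 5]
    else
      match pvLargestPal n with
      | none => out
      | some a => pvAltLoop f (n - a) (out ++ [a])

def solve_alt (n : Int) : List Int := (pvAltLoop (n.toNat + 1) n []).reverse

-- ===== PRECONDITION & SPEC =====
-- Pre_solve excludes n < 0, where the Python A (and B) raise ValueError from int('-…-').
def Pre_solve (n : Int) : Prop := 0 ≤ n
instance (n : Int) : Decidable (Pre_solve n) := by unfold Pre_solve; infer_instance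
def pvWitness_solve : Int := (21)

def Spec_solve (n : Int) (out : List Int) : Prop := out = solve_alt n
instance (n : Int) (out : List Int) : Decidable (Spec_solve n out) := by unfold Spec_solve; infer_instance

-- ===== CLAIM (what is proved, stated in full; the proofs are below) =====
def Claim_equal_solve : Prop := ∀ (n : Int), Dom_solve n → Pre_solve n → Spec_solve n (solve n)

-- ===== LEMMAS AND PROOFS =====

-- loop invariant: the accumulator loop computes A's result reversed, behind out.
lemma pvAltLoop_eq (f : Nat) : ∀ (n : Int) (out : List Int),
    pvAltLoop f n out = out ++ (solveFuel f n).reverse := by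
  induction f with
  | zero => intro n out; simp [pvAltLoop, solveFuel]
  | succ f ih =>
    intro n out
    simp only [pvAltLoop, solveFuel, pvLargestPal]
    by_cases h0 : n = 0
    · simp [h0]
    by_cases h10 : n = 10
    · simp [h10]
    simp only [if_neg h0, if_neg h10]
    cases hx : PySem.Int.ofChars? (PySem.List.slice (PySem.Int.toChars n) none
        (some (PySem.Int.floordiv (((PySem.Int.toChars n).length : Int) + 1) 2))) with
    | none => simp only [hx]; simp
    | some x0 =>
      simp only [hx]
      cases hp : PySem.Int.ofChars? (PySem.Int.toChars x0 ++
          (PySem.List.slice (PySem.Int.toChars x0) none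
            (some (PySem.Int.floordiv (((PySem.Int.toChars n).length : Int)) 2))).reverse) with
      | none => simp only [hp]; simp
      | some px =>
        simp only [hp]
        by_cases hgt : n < px
        · simp only [if_pos hgt]
          cases ha : PySem.Int.ofChars? (PySem.Int.toChars (x0 - 1) ++
              (PySem.List.slice (PySem.Int.toChars (x0 - 1)) none
                (some (PySem.Int.floordiv (((PySem.Int.toChars n).length : Int)) 2))).reverse) with
          | none => simp only [ha]; simp
          | some a => simp only [ha, ih]; simp
        · simp only [if_neg hgt, hp, ih]
          simp

-- ===== VERDICT (by name: the statement is the Claim_ definition above) =====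
theorem solve_spec : Claim_equal_solve := by
  intro n _ _
  unfold Spec_solve solve solve_alt
  rw [pvAltLoop_eq]
  simp
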